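-- pv_equiv track=rewrite | github.com/smartprasad2001-cyber/MIID | maximize_orthographic_similarity.py | _apply_title_removal
-- ===== SOURCE A (Python) =====
-- from typing import List, Set, Tuple, Dict, Optional, Any
--
-- def _apply_title_removal(word: str, max_variations: int = 50) -> Set[str]:
--     """Generate variations by removing title prefix."""
--     variations = set()
--     titles = ["Mr.", "Mrs.", "Ms.", "Mr", "Mrs", "Ms", "Miss", "Dr.", "Dr",
--               "Prof.", "Prof", "Sir", "Lady", "Lord", "Dame", "Master", "Mistress",
--               "Rev.", "Hon.", "Capt.", "Col.", "Lt.", "Sgt.", "Maj."]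
--
--     word_lower = word.lower()
--     for title in titles:
--         title_lower = title.lower()
--         if word_lower.startswith(title_lower + " "):
--             # Remove title
--             new_word = word[len(title):].strip()
--             if new_word and new_word != word:
--                 variations.add(new_word)
--                 if len(variations) >= max_variations:
--                     break
--
--     return variations
-- ===== SOURCE B (Python) =====
-- _TITLES_LOWER = {"mr.", "mrs.", "ms.", "mr", "mrs", "ms", "miss", "dr.", "dr",
--                  "prof.", "prof", "sir", "lady", "lord", "dame", "master", "mistress",
--                  "rev.", "hon.", "capt.", "col.", "lt.", "sgt.", "maj."}
--
-- def _apply_title_removal(word: str, max_variations: int = 50) -> set: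
--     """Generate variations by removing title prefix (single lookup instead of scanning all titles)."""
--     first, sep, rest = word.partition(' ')
--     if sep and first.lower() in _TITLES_LOWER:
--         new_word = rest.strip()
--         if new_word:
--             return {new_word}
--     return set()
-- ===== Notes on version B (the rewrite author's own statement) =====
-- stated objective: simpler
-- what changed: Replaces the scan over all 24 titles (lowering the whole word and testing startswith for each) by a single partition at the first space plus one membership lookup of the lowered first token in a prebuilt set of lowered titles.
import Mathlib
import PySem

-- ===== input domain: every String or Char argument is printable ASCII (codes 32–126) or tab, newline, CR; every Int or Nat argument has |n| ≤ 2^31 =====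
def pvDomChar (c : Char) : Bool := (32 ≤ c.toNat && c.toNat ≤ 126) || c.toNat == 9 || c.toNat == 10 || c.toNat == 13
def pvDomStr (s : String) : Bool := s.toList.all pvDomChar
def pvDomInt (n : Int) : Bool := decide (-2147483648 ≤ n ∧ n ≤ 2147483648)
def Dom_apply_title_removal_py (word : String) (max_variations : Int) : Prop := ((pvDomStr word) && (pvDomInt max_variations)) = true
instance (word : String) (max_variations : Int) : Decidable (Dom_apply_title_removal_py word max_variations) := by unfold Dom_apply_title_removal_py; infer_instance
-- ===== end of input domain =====

-- B replaces A's scan over all 24 titles by one partition at the first space plus a single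
-- membership lookup of the lowered first token in a prebuilt set of lowered titles (simpler).


-- ===== PORT A =====
def pvTitles : List String :=
  ["Mr.", "Mrs.", "Ms.", "Mr", "Mrs", "Ms", "Miss", "Dr.", "Dr",
   "Prof.", "Prof", "Sir", "Lady", "Lord", "Dame", "Master", "Mistress",
   "Rev.", "Hon.", "Capt.", "Col.", "Lt.", "Sgt.", "Maj."]

-- the 'for title in titles' loop, with the 'break' as early return
def atrLoop (word word_lower : String) (max_variations : Int) :
    List String → PySem.Set String → PySem.Set String
  | [], variations => variations
  | title :: rest, variations =>
    let title_lower := PySem.Str.lower title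
    if PySem.Str.startswith word_lower (title_lower ++ " ") then
      let new_word := PySem.Str.strip (PySem.Str.slice word (some (PySem.Str.len title)) none)
      if new_word ≠ "" ∧ new_word ≠ word then
        let v' := PySem.Set.add variations new_word
        if max_variations ≤ (PySem.Set.len v' : Int) then v'
        else atrLoop word word_lower max_variations rest v'
      else atrLoop word word_lower max_variations rest variations
    else atrLoop word word_lower max_variations rest variations

def apply_title_removal_py (word : String) (max_variations : Int) : List String :=
  atrLoop word (PySem.Str.lower word) max_variations pvTitles PySem.Set.empty

-- ===== PORT B =====
def pvTitleSet : PySem.Set String :=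
  PySem.Set.ofList ["mr.", "mrs.", "ms.", "mr", "mrs", "ms", "miss", "dr.", "dr",
                    "prof.", "prof", "sir", "lady", "lord", "dame", "master", "mistress",
                    "rev.", "hon.", "capt.", "col.", "lt.", "sgt.", "maj."]

def pvNotSpace (c : Char) : Bool := c ≠ ' '

def apply_title_removal_py_alt (word : String) (max_variations : Int) : List String :=
  -- word.partition(' ') ported by hand on the char list (exact: 'first' is everything before the
  -- first space, the separator is present iff 'first' is shorter than the word, 'rest' follows it)
  let cs := word.toList
  let first := cs.takeWhile pvNotSpace
  if first.length < cs.length ∧ String.ofList (PySem.Chars.lower first) ∈ pvTitleSet then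
    let new_word := PySem.Chars.strip (cs.drop (first.length + 1))
    if new_word ≠ [] then [String.ofList new_word] else []
  else []

-- ===== PRECONDITION & SPEC =====
def Spec_apply_title_removal_py (word : String) (max_variations : Int) (out : List String) : Prop := out = apply_title_removal_py_alt word max_variations
instance (word : String) (max_variations : Int) (out : List String) : Decidable (Spec_apply_title_removal_py word max_variations out) := by unfold Spec_apply_title_removal_py; infer_instance

-- ===== CLAIM (what is proved, stated in full; the proofs are below) =====
def Claim_equal_apply_title_removal_py : Prop := ∀ (word : String) (max_variations : Int), Dom_apply_title_removal_py word max_variations → Spec_apply_title_removal_py word max_variations (apply_title_removal_py word max_variations)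

-- ===== LEMMAS AND PROOFS =====

-- A's per-title match test and removal result, named for the proofs
def pvMatch (word t : String) : Bool :=
  PySem.Str.startswith (PySem.Str.lower word) (PySem.Str.lower t ++ " ")

def pvNw (word t : String) : String :=
  PySem.Str.strip (PySem.Str.slice word (some (PySem.Str.len t)) none)

-- B's removal result, named for the proofs
def pvNwB (word : String) : List Char :=
  PySem.Chars.strip (word.toList.drop ((word.toList.takeWhile pvNotSpace).length + 1))

theorem pv_lowerChar_eq_space_iff (c : Char) : PySem.Chars.lowerChar c = ' ' ↔ c = ' ' := by
  unfold PySem.Chars.lowerChar PySem.Chars.isupper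
  split
  · rename_i hu
    simp only [Bool.and_eq_true, decide_eq_true_eq] at hu
    obtain ⟨h1, h2⟩ := hu
    have h1' : 65 ≤ c.toNat := h1
    have h2' : c.toNat ≤ 90 := h2
    constructor
    · intro h
      have hv : (c.toNat + 32).isValidChar := Or.inl (by omega)
      have hh := congrArg Char.toNat h
      rw [Char.toNat_ofNat] at hh
      simp [hv] at hh
      have : (' ').toNat = 32 := by decide
      omega
    · intro h
      subst h
      exact absurd h1' (by decide)
  · simp

-- lowering commutes with taking the first space-free token
theorem pv_takeWhile_lower (l : List Char) :
    (PySem.Chars.lower l).takeWhile pvNotSpace = PySem.Chars.lower (l.takeWhile pvNotSpace) := by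
  unfold PySem.Chars.lower
  rw [List.takeWhile_map]
  have h : (pvNotSpace ∘ PySem.Chars.lowerChar) = pvNotSpace := by
    funext c; simp [pvNotSpace, Function.comp, pv_lowerChar_eq_space_iff]
  rw [h]

theorem pv_match_iff (word t : String) (ht : ' ' ∉ t.toList) :
    pvMatch word t = true ↔
      ((word.toList.takeWhile pvNotSpace).length < word.toList.length ∧
       PySem.Chars.lower (word.toList.takeWhile pvNotSpace) = PySem.Chars.lower t.toList) := by
  unfold pvMatch
  rw [PySem.Str.startswith_eq, PySem.Chars.startswith_iff]
  have htl : (PySem.Str.lower t ++ " ").toList = PySem.Chars.lower t.toList ++ [' '] := by simp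
  rw [htl, PySem.Str.toList_lower]
  set w := word.toList with hw
  set ft := w.takeWhile pvNotSpace with hft
  have hltno : ∀ c ∈ PySem.Chars.lower t.toList, pvNotSpace c = true := by
    intro c hc
    simp only [PySem.Chars.lower, List.mem_map] at hc
    obtain ⟨x, hx, rfl⟩ := hc
    simp only [pvNotSpace, ne_eq, decide_eq_true_eq, pv_lowerChar_eq_space_iff]
    intro h; exact ht (h ▸ hx)
  constructor
  · rintro ⟨r, hr⟩
    have hlw : PySem.Chars.lower w = PySem.Chars.lower t.toList ++ ' ' :: r := by
      rw [← hr]; simp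
    have h1 : (PySem.Chars.lower w).takeWhile pvNotSpace = PySem.Chars.lower t.toList := by
      rw [hlw, List.takeWhile_append]
      rw [List.takeWhile_eq_self_iff.mpr hltno]
      simp [pvNotSpace]
    rw [pv_takeWhile_lower] at h1
    refine ⟨?_, h1⟩
    have hlen1 : ft.length = t.toList.length := by
      have h2 := congrArg List.length h1
      simpa only [PySem.Chars.lower, List.length_map] using h2
    have hlen2 : w.length = t.toList.length + 1 + r.length := by
      have h3 := congrArg List.length hlw
      simp only [PySem.Chars.lower, List.length_map, List.length_append, List.length_cons] at h3
      omega
    omega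
  · rintro ⟨hlen, heq⟩
    have hsplit : ft ++ w.dropWhile pvNotSpace = w := List.takeWhile_append_dropWhile
    have hdw : w.dropWhile pvNotSpace ≠ [] := by
      intro h
      have h4 := congrArg List.length hsplit
      rw [h] at h4; simp at h4; omega
    obtain ⟨d, ds, hds⟩ := List.exists_cons_of_ne_nil hdw
    have hd : d = ' ' := by
      have h5 := List.head_dropWhile_not pvNotSpace hdw
      simp only [hds, List.head_cons] at h5
      simpa [pvNotSpace] using h5
    refine ⟨PySem.Chars.lower ds, ?_⟩
    have hw2 : w = ft ++ ' ' :: ds := by rw [← hsplit, hds, hd]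
    rw [hw2]
    simp only [PySem.Chars.lower] at heq ⊢
    simp [heq, show PySem.Chars.lowerChar ' ' = ' ' by decide]

theorem pv_decomp (word t : String) (ht : ' ' ∉ t.toList) (hm : pvMatch word t = true) :
    t.toList.length = (word.toList.takeWhile pvNotSpace).length ∧
    word.toList = word.toList.takeWhile pvNotSpace ++
      ' ' :: word.toList.drop ((word.toList.takeWhile pvNotSpace).length + 1) := by
  obtain ⟨hlen, heq⟩ := (pv_match_iff word t ht).mp hm
  set w := word.toList with hw
  set ft := w.takeWhile pvNotSpace with hft
  have hlen1 : t.toList.length = ft.length := by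
    have h2 := congrArg List.length heq
    simpa only [PySem.Chars.lower, List.length_map] using h2.symm
  refine ⟨hlen1, ?_⟩
  have hsplit : ft ++ w.dropWhile pvNotSpace = w := List.takeWhile_append_dropWhile
  have hdw : w.dropWhile pvNotSpace ≠ [] := by
    intro h
    have h4 := congrArg List.length hsplit
    rw [h] at h4; simp at h4; omega
  obtain ⟨d, ds, hds⟩ := List.exists_cons_of_ne_nil hdw
  have hd : d = ' ' := by
    have h5 := List.head_dropWhile_not pvNotSpace hdw
    simp only [hds, List.head_cons] at h5
    simpa [pvNotSpace] using h5
  have hw2 : w = ft ++ ' ' :: ds := by rw [← hsplit, hds, hd]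
  have hdrop : w.drop (ft.length + 1) = ds := by
    conv_lhs => rw [hw2, show ft ++ ' ' :: ds = (ft ++ [' ']) ++ ds by simp]
    exact List.drop_left' (by simp)
  rw [hdrop]; exact hw2

theorem pv_len_strip_le (s : List Char) : (PySem.Chars.strip s).length ≤ s.length := by
  unfold PySem.Chars.strip PySem.Chars.rstrip
  rw [List.length_reverse]
  refine le_trans (List.length_dropWhile_le _ _) ?_
  rw [List.length_reverse]
  unfold PySem.Chars.lstrip
  exact List.length_dropWhile_le _ _

theorem pv_nw_toList (word t : String) (ht : ' ' ∉ t.toList) (hm : pvMatch word t = true) :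
    (pvNw word t).toList = pvNwB word := by
  obtain ⟨hlen1, hw2⟩ := pv_decomp word t ht hm
  unfold pvNw pvNwB
  rw [PySem.Str.toList_strip, PySem.Str.toList_slice]
  unfold PySem.Chars.slice
  rw [show PySem.Str.len t = ((t.toList.length : Nat) : Int) from rfl]
  rw [PySem.List.slice_from_natCast]
  rw [hlen1]
  set w := word.toList with hwdef
  set ft := w.takeWhile pvNotSpace with hftdef
  set rest := w.drop (ft.length + 1) with hrestdef
  have hdropft : w.drop ft.length = ' ' :: rest := by
    conv_lhs => rw [hw2]
    exact List.drop_left' rfl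
  rw [hdropft]
  simp [PySem.Chars.strip, PySem.Chars.lstrip,
    show PySem.Chars.isspace ' ' = true by decide]

theorem pv_nw_eq (word t : String) (ht : ' ' ∉ t.toList) (hm : pvMatch word t = true) :
    pvNw word t = String.ofList (pvNwB word) := by
  rw [← pv_nw_toList word t ht hm, String.ofList_toList]

theorem pv_nw_ne_word (word t : String) (ht : ' ' ∉ t.toList) (htne : t.toList ≠ [])
    (hm : pvMatch word t = true) : pvNw word t ≠ word := by
  intro h
  obtain ⟨hlen1, hw2⟩ := pv_decomp word t ht hm
  have h1 := congrArg (fun s => s.toList.length) h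
  simp only at h1
  rw [pv_nw_toList word t ht hm] at h1
  have h2 : (pvNwB word).length ≤ (word.toList.drop ((word.toList.takeWhile pvNotSpace).length + 1)).length := pv_len_strip_le _
  have h3 := congrArg List.length hw2
  simp only [List.length_append, List.length_cons] at h3
  have h4 : 0 < t.toList.length := List.length_pos_of_ne_nil htne
  omega

-- loop lemmas
theorem pv_loop_stable (word : String) (m : Int) (ts : List String) (nw : String)
    (h : ∀ t ∈ ts, pvMatch word t = true → pvNw word t = nw) :
    atrLoop word (PySem.Str.lower word) m ts [nw] = [nw] := by
  induction ts with
  | nil => simp [atrLoop]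
  | cons t ts ih =>
    have hih := ih (fun t' ht' => h t' (List.mem_cons_of_mem _ ht'))
    simp only [atrLoop]
    by_cases hm : PySem.Str.startswith (PySem.Str.lower word) (PySem.Str.lower t ++ " ") = true
    · rw [if_pos hm]
      have hnw : pvNw word t = nw := h t List.mem_cons_self (by exact hm)
      rw [show PySem.Str.strip (PySem.Str.slice word (some (PySem.Str.len t)) none) = pvNw word t from rfl, hnw]
      split
      · rw [PySem.Set.add_of_mem (by simp)]
        split
        · rfl
        · exact hih
      · exact hih
    · rw [if_neg hm]
      exact hih

theorem pv_loop_main (word : String) (m : Int) (ts : List String) (nw : String)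
    (h : ∀ t ∈ ts, pvMatch word t = true → pvNw word t = nw)
    (hw : ∀ t ∈ ts, pvMatch word t = true → nw ≠ word) :
    atrLoop word (PySem.Str.lower word) m ts [] =
      if (∃ t ∈ ts, pvMatch word t = true) ∧ nw ≠ "" then [nw] else [] := by
  induction ts with
  | nil => simp [atrLoop]
  | cons t ts ih =>
    have hih := ih (fun t' ht' => h t' (List.mem_cons_of_mem _ ht'))
      (fun t' ht' => hw t' (List.mem_cons_of_mem _ ht'))
    simp only [atrLoop]
    by_cases hm : PySem.Str.startswith (PySem.Str.lower word) (PySem.Str.lower t ++ " ") = true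
    · rw [if_pos hm]
      have hmm : pvMatch word t = true := hm
      have hnw : pvNw word t = nw := h t List.mem_cons_self hmm
      have hne : nw ≠ word := hw t List.mem_cons_self hmm
      rw [show PySem.Str.strip (PySem.Str.slice word (some (PySem.Str.len t)) none) = pvNw word t from rfl, hnw]
      have hex : (∃ t' ∈ t :: ts, pvMatch word t' = true) := ⟨t, List.mem_cons_self, hmm⟩
      by_cases hnil : nw ≠ ""
      · rw [if_pos ⟨hnil, hne⟩]
        have hadd : PySem.Set.add ([] : PySem.Set String) nw = [nw] := rfl
        rw [hadd]
        have hrhs : (if (∃ t' ∈ t :: ts, pvMatch word t' = true) ∧ nw ≠ "" then [nw] else ([] : List String)) = [nw] :=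
          if_pos ⟨hex, hnil⟩
        rw [hrhs]
        split
        · rfl
        · exact pv_loop_stable word m ts nw (fun t' ht' => h t' (List.mem_cons_of_mem _ ht'))
      · have hnil' : nw = "" := not_not.mp hnil
        rw [if_neg (by simp [hnil'])]
        rw [hih, if_neg (by simp [hnil']), if_neg (by simp [hnil'])]
    · rw [if_neg hm]
      rw [hih]
      have : (∃ t' ∈ t :: ts, pvMatch word t' = true) ↔ (∃ t' ∈ ts, pvMatch word t' = true) := by
        constructor
        · rintro ⟨t', ht', hmt⟩
          rcases List.mem_cons.mp ht' with rfl | ht''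
          · exact absurd hmt (by simpa [pvMatch] using hm)
          · exact ⟨t', ht'', hmt⟩
        · rintro ⟨t', ht', hmt⟩
          exact ⟨t', List.mem_cons_of_mem _ ht', hmt⟩
      simp only [this]

-- the existence of a matching title is exactly B's membership test
theorem pv_exists_match_iff (word : String) :
    (∃ t ∈ pvTitles, pvMatch word t = true) ↔
      ((word.toList.takeWhile pvNotSpace).length < word.toList.length ∧
       String.ofList (PySem.Chars.lower (word.toList.takeWhile pvNotSpace)) ∈ pvTitleSet) := by
  have hsp : ∀ t ∈ pvTitles, ' ' ∉ t.toList := by decide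
  constructor
  · rintro ⟨t, htmem, hm⟩
    obtain ⟨hlen, heq⟩ := (pv_match_iff word t (hsp t htmem)).mp hm
    refine ⟨hlen, ?_⟩
    have : String.ofList (PySem.Chars.lower (word.toList.takeWhile pvNotSpace)) = PySem.Str.lower t := by
      rw [heq]; rfl
    rw [this]
    revert htmem
    have : ∀ t ∈ pvTitles, PySem.Str.lower t ∈ pvTitleSet := by decide
    exact this t
  · rintro ⟨hlen, hmem⟩
    have hall : ∀ s ∈ pvTitleSet, ∃ t ∈ pvTitles, PySem.Str.lower t = s := by decide
    obtain ⟨t, htmem, hteq⟩ := hall _ hmem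
    refine ⟨t, htmem, (pv_match_iff word t (hsp t htmem)).mpr ⟨hlen, ?_⟩⟩
    have := congrArg String.toList hteq
    rw [PySem.Str.toList_lower, String.toList_ofList] at this
    exact this.symm

-- ===== VERDICT (by name: the statement is the Claim_ definition above) =====
theorem apply_title_removal_py_spec : Claim_equal_apply_title_removal_py := by
  intro word m _hdom
  unfold Spec_apply_title_removal_py apply_title_removal_py apply_title_removal_py_alt
  have hsp : ∀ t ∈ pvTitles, ' ' ∉ t.toList := by decide
  have hne : ∀ t ∈ pvTitles, t.toList ≠ [] := by decide
  have h : ∀ t ∈ pvTitles, pvMatch word t = true → pvNw word t = String.ofList (pvNwB word) :=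
    fun t ht hm => pv_nw_eq word t (hsp t ht) hm
  have hw : ∀ t ∈ pvTitles, pvMatch word t = true → String.ofList (pvNwB word) ≠ word := by
    intro t ht hm
    rw [← pv_nw_eq word t (hsp t ht) hm]
    exact pv_nw_ne_word word t (hsp t ht) (hne t ht) hm
  rw [show (PySem.Set.empty : PySem.Set String) = [] from rfl]
  rw [pv_loop_main word m pvTitles (String.ofList (pvNwB word)) h hw]
  simp only [pv_exists_match_iff word]
  show _ = (if (word.toList.takeWhile pvNotSpace).length < word.toList.length ∧
      String.ofList (PySem.Chars.lower (word.toList.takeWhile pvNotSpace)) ∈ pvTitleSet then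
      (if PySem.Chars.strip (word.toList.drop ((word.toList.takeWhile pvNotSpace).length + 1)) ≠ [] then
        [String.ofList (PySem.Chars.strip (word.toList.drop ((word.toList.takeWhile pvNotSpace).length + 1)))]
      else [])
    else [])
  rw [show PySem.Chars.strip (word.toList.drop ((word.toList.takeWhile pvNotSpace).length + 1)) = pvNwB word from rfl]
  have hemp : (String.ofList (pvNwB word) = "") ↔ pvNwB word = [] := by
    constructor
    · intro hh
      have := congrArg String.toList hh
      simpa using this
    · intro hh; rw [hh]
  by_cases hc : ((word.toList.takeWhile pvNotSpace).length < word.toList.length ∧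
      String.ofList (PySem.Chars.lower (word.toList.takeWhile pvNotSpace)) ∈ pvTitleSet)
  · rw [if_pos hc]
    by_cases hn : pvNwB word = []
    · rw [if_neg (by simp [hn]), if_neg (by simp [hn])]
    · rw [if_pos ⟨hc, by simp [hemp, hn]⟩, if_pos (by simp [hn])]
  · rw [if_neg hc, if_neg (by tauto)]
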